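-- pv_equiv track=rewrite | github.com/daveisagit/advent-of-code | src/2017/day_24.py | get_longest_bridge
-- ===== SOURCE A (Python) =====
-- from collections import deque
--
-- def get_longest_bridge(components):
--     """Find the longest"""
--     dfs = deque()
--     dfs.append(([], 0))
--
--     longest = 0
--     longest_strength = 0
--     while dfs:
--         chain, port = dfs.pop()
--         strength = sum(sum(c) for c in chain)
--
--         if len(chain) >= longest:
--             if len(chain) > longest:
--                 longest_strength = strength
--             else:
--                 longest_strength = max(longest_strength, strength)
--             longest = len(chain)
--
--         available = set(components)
--         used = set(chain)
--         available.difference_update(used)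
--         options = [cmp for cmp in available if port in cmp]
--         for opt in options:
--             new_chain = chain.copy()
--             new_chain.append(opt)
--             ports = list(opt)
--             ports.remove(port)
--             new_port = ports[0]
--             dfs.append((new_chain, new_port))
--
--     return longest_strength
-- ===== SOURCE B (Python) =====
-- def get_longest_bridge(components):
--     """Strength of the strongest among the longest bridges (recursive DFS,
--     carrying (length, strength) pairs instead of re-scanning the chain)."""
--     pool = list(dict.fromkeys(components))  # distinct components, like A's set bookkeeping
--
--     def dfs(avail, port):
--         best = (0, 0)
--         for c in avail:
--             if port in c:
--                 rest = list(c)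
--                 rest.remove(port)
--                 if rest:
--                     l, s = dfs([x for x in avail if x != c], rest[0])
--                     cand = (l + 1, s + sum(c))
--                 else:
--                     cand = (1, sum(c))  # one-port component ends the chain
--                 best = max(best, cand)
--         return best
--
--     return dfs(pool, 0)[1]
-- ===== Notes on version B (the rewrite author's own statement) =====
-- stated objective: alternative
-- what changed: Replaces A's explicit work-stack that re-computes the whole chain's strength and rebuilds set(components)-set(chain) at every node by a recursive DFS that passes the shrinking pool down and returns lex-max (length, strength) pairs combined incrementally.
-- outside the precondition, e.g. on get_longest_bridge([(1,), (1, 2)]): A returns 0, B returns 0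
import Mathlib
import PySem

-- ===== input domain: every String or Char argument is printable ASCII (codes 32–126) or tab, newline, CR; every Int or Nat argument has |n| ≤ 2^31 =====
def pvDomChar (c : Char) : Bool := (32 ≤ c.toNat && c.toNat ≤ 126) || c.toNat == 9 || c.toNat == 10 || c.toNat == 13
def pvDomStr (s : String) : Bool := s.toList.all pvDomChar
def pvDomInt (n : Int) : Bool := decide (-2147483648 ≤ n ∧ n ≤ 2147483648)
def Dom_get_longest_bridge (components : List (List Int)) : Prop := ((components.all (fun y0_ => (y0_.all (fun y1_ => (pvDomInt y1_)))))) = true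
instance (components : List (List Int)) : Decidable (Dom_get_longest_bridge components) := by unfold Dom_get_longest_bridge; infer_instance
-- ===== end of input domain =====

-- B replaces A's explicit work-stack (which re-sums the whole chain and rebuilds the
-- available set at every node) by a recursive DFS returning lex-max (length, strength)
-- pairs built incrementally; objective: alternative (same exponential cost).

-- ===== PORT A =====
def pvSumC (c : List Int) : Int := c.foldl (· + ·) 0            -- sum(c)
def pvStrength (chain : List (List Int)) : Int :=
  chain.foldl (fun s c => s + pvSumC c) 0                       -- sum(sum(c) for c in chain)
-- ports = list(opt); ports.remove(port); ports[0]
-- (.getD [] / .headD 0 guard the ValueError/IndexError cases, unreachable inside Pre_)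
def pvNewPort (port : Int) (opt : List Int) : Int :=
  ((PySem.List.remove? opt port).getD []).headD 0

def aLoop (components : List (List Int)) :
    Nat → List (List (List Int) × Int) → Int → Int → Int
  | 0, _, _, ls => ls            -- fuel guard only; the fuel supplied below always suffices
  | _+1, [], _, ls => ls         -- while dfs: loop exit
  | fuel+1, (chain, port) :: rest, longest, ls =>
    let strength := pvStrength chain
    let longest' := if (chain.length : Int) ≥ longest then (chain.length : Int) else longest
    let ls' := if (chain.length : Int) ≥ longest then
                 (if (chain.length : Int) > longest then strength else max ls strength)
               else ls
    let available := PySem.Set.diff (PySem.Set.ofList components) (PySem.Set.ofList chain)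
    let options := available.filter (fun cmp => decide (port ∈ cmp))
    let stack' := options.foldl (fun st opt => (chain ++ [opt], pvNewPort port opt) :: st) rest
    aLoop components fuel stack' longest' ls'

def get_longest_bridge (components : List (List Int)) : Int :=
  aLoop components (Nat.factorial (components.length + 1)) [([], 0)] 0 0

-- ===== PORT B =====
def pvLexLt (a b : Int × Int) : Bool := a.1 < b.1 || (a.1 == b.1 && a.2 < b.2)
def pvTMax (a b : Int × Int) : Int × Int := if pvLexLt a b then b else a   -- max(a, b) on int pairs

-- the 'for c in avail' loop of Source B's dfs; 'next' is the recursive call at the next depth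
def bGoF (next : List (List Int) → Int → Int × Int) (pool : List (List Int)) :
    List (List Int) → Int → (Int × Int) → Int × Int
  | [], _, best => best
  | c :: rem, port, best =>
    let best' :=
      if port ∈ c then
        let rest := (PySem.List.remove? c port).getD []
        let cand :=
          match rest with
          | [] => ((1 : Int), pvSumC c)
          | p :: _ =>
            let r := next (pool.filter (fun x => decide (x ≠ c))) p
            (r.1 + 1, r.2 + pvSumC c)
        pvTMax best cand
      else best
    bGoF next pool rem port best'

def bDfs : Nat → List (List Int) → Int → Int × Int
  | 0, _, _ => (0, 0)            -- fuel guard only; the fuel supplied below always suffices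
  | fuel+1, pool, port => bGoF (bDfs fuel) pool pool port (0, 0)

def get_longest_bridge_alt (components : List (List Int)) : Int :=
  let pool := PySem.List.dedup components
  (bDfs (pool.length + 1) pool 0).2

-- ===== PRECONDITION & SPEC =====
-- Pre_ excludes inputs containing a one-port component [p] with p = 0 or with p occurring in
-- another component: on those A can hit IndexError at ports[0] (e.g. on [[0]] or [[0,1],[1]]),
-- while where such a singleton happens to be unreachable A still returns the value B also
-- returns (see the cite).
def Pre_get_longest_bridge (components : List (List Int)) : Prop :=
  ∀ c ∈ components, c.length = 1 →
    c.headD 0 ≠ 0 ∧ ∀ c' ∈ components, c' = c ∨ c.headD 0 ∉ c'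
instance (components : List (List Int)) : Decidable (Pre_get_longest_bridge components) := by
  unfold Pre_get_longest_bridge; infer_instance
def pvWitness_get_longest_bridge : List (List Int) := [[0, 2], [2, 2]]
def Spec_get_longest_bridge (components : List (List Int)) (out : Int) : Prop :=
  out = get_longest_bridge_alt components
instance (components : List (List Int)) (out : Int) : Decidable (Spec_get_longest_bridge components out) := by
  unfold Spec_get_longest_bridge; infer_instance

-- ===== CLAIM (what is proved, stated in full; the proofs are below) =====
def Claim_equal_get_longest_bridge : Prop :=
  ∀ (components : List (List Int)), Dom_get_longest_bridge components →
    Pre_get_longest_bridge components →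
    Spec_get_longest_bridge components (get_longest_bridge components)

-- ===== LEMMAS AND PROOFS =====

-- lex-max basics ------------------------------------------------------------
theorem pvTMax_idem (a : Int × Int) : pvTMax a a = a := by
  simp [pvTMax]

theorem pvTMax_comm (a b : Int × Int) : pvTMax a b = pvTMax b a := by
  obtain ⟨a1, a2⟩ := a; obtain ⟨b1, b2⟩ := b
  simp only [pvTMax, pvLexLt]
  split_ifs <;> simp_all <;> omega

theorem pvTMax_assoc (a b c : Int × Int) : pvTMax (pvTMax a b) c = pvTMax a (pvTMax b c) := by
  obtain ⟨a1, a2⟩ := a; obtain ⟨b1, b2⟩ := b; obtain ⟨c1, c2⟩ := c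
  simp only [pvTMax, pvLexLt]
  split_ifs <;> simp_all <;> omega

-- A's (longest, longest_strength) update is the lex-max with (len, strength)
theorem pv_upd_fst (L S len str : Int) :
    (if len ≥ L then len else L) = (pvTMax (L, S) (len, str)).1 := by
  simp only [pvTMax, pvLexLt]
  split_ifs <;> simp_all <;> omega

theorem pv_upd_snd (L S len str : Int) :
    (if len ≥ L then (if len > L then str else max S str) else S)
      = (pvTMax (L, S) (len, str)).2 := by
  simp only [pvTMax, pvLexLt]
  split_ifs <;> simp_all <;> omega

-- translation invariance ----------------------------------------------------
def pvShift (k s : Int) (p : Int × Int) : Int × Int := (k + p.1, s + p.2)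

theorem pvTMax_shift (k s : Int) (a b : Int × Int) :
    pvTMax (pvShift k s a) (pvShift k s b) = pvShift k s (pvTMax a b) := by
  obtain ⟨a1, a2⟩ := a; obtain ⟨b1, b2⟩ := b
  simp only [pvTMax, pvLexLt, pvShift]
  split_ifs <;> simp_all <;> omega

theorem pv_foldl_shift {α : Type} (k s : Int) (g : α → Int × Int) :
    ∀ (l : List α) (init : Int × Int),
      List.foldl (fun b c => pvTMax b (pvShift k s (g c))) (pvShift k s init) l
        = pvShift k s (List.foldl (fun b c => pvTMax b (g c)) init l)
  | [], _ => rfl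
  | c :: l, init => by
    simp only [List.foldl_cons, pvTMax_shift]
    exact pv_foldl_shift k s g l _

theorem pvTMax_foldl_distrib {α : Type} (g : α → Int × Int) :
    ∀ (l : List α) (a b : Int × Int),
      pvTMax a (List.foldl (fun x c => pvTMax x (g c)) b l)
        = List.foldl (fun x c => pvTMax x (g c)) (pvTMax a b) l
  | [], _, _ => rfl
  | c :: l, a, b => by
    simp only [List.foldl_cons]
    rw [pvTMax_foldl_distrib g l a (pvTMax b (g c)), ← pvTMax_assoc]

theorem pvTMax_foldl_self {α : Type} (g : α → Int × Int) (l : List α) (a : Int × Int) :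
    pvTMax a (List.foldl (fun x c => pvTMax x (g c)) a l)
      = List.foldl (fun x c => pvTMax x (g c)) a l := by
  rw [pvTMax_foldl_distrib, pvTMax_idem]

theorem pv_foldl_tmax_reverse {α : Type} (g : α → Int × Int) (l : List α) (a : Int × Int) :
    List.foldl (fun x c => pvTMax x (g c)) a l.reverse
      = List.foldl (fun x c => pvTMax x (g c)) a l := by
  haveI : RightCommutative (fun (x : Int × Int) (c : α) => pvTMax x (g c)) :=
    ⟨fun b x y => by
      simp only [pvTMax_assoc]
      rw [pvTMax_comm (g x) (g y)]⟩
  exact (List.reverse_perm l).foldl_eq a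

theorem pv_foldl_tmax_ext {α : Type} (g1 g2 : α → Int × Int) :
    ∀ (l : List α) (a : Int × Int), (∀ x ∈ l, g1 x = g2 x) →
      List.foldl (fun b c => pvTMax b (g1 c)) a l
        = List.foldl (fun b c => pvTMax b (g2 c)) a l
  | [], _, _ => rfl
  | c :: l, a, h => by
    simp only [List.foldl_cons, h c (by simp)]
    exact pv_foldl_tmax_ext g1 g2 l _ (fun x hx => h x (by simp [hx]))

-- A's push loop builds the reversed child list on top of the stack ----------
theorem pv_foldl_push {α β : Type} (g : α → β) :
    ∀ (l : List α) (st : List β),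
      l.foldl (fun st x => g x :: st) st = (l.reverse.map g) ++ st
  | [], _ => rfl
  | x :: l, st => by
    simp only [List.foldl_cons, pv_foldl_push g l, List.reverse_cons, List.map_append]
    simp

theorem pvStrength_append (chain : List (List Int)) (c : List Int) :
    pvStrength (chain ++ [c]) = pvStrength chain + pvSumC c := by
  simp [pvStrength, List.foldl_append]

-- the available pool --------------------------------------------------------
def availL (components chain : List (List Int)) : List (List Int) :=
  (PySem.List.dedup components).filter (fun x => decide (x ∉ chain))

theorem pv_diff_eq_availL (comps chain : List (List Int)) :
    PySem.Set.diff (PySem.Set.ofList comps) (PySem.Set.ofList chain)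
      = availL comps chain := by
  unfold PySem.Set.diff availL
  rw [show PySem.Set.ofList comps = PySem.List.dedup comps from by simp]
  apply List.filter_congr
  intro x hx
  simp [PySem.Set.mem_ofList]

theorem pv_availL_nil (comps : List (List Int)) :
    availL comps [] = PySem.List.dedup comps := by
  simp [availL]

theorem pv_availL_append (comps chain : List (List Int)) (opt : List Int) :
    availL comps (chain ++ [opt]) = (availL comps chain).filter (fun x => decide (x ≠ opt)) := by
  unfold availL
  rw [List.filter_filter]
  apply List.filter_congr
  intro x hx
  simp only [List.mem_append, List.mem_singleton, not_or]
  rcases Decidable.em (x ∈ chain) with h1 | h1 <;> rcases Decidable.em (x = opt) with h2 | h2 <;>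
    simp [h1, h2]

theorem pv_nodup_availL (comps chain : List (List Int)) : (availL comps chain).Nodup :=
  (PySem.List.nodup_dedup comps).filter _

theorem pv_availL_subset {comps chain : List (List Int)} {x : List Int}
    (hx : x ∈ availL comps chain) : x ∈ comps := by
  unfold availL at hx
  have hx' := List.mem_of_mem_filter hx
  rwa [PySem.List.mem_dedup] at hx'

theorem pv_length_filter_ne {l : List (List Int)} {c : List Int}
    (hnd : l.Nodup) (hc : c ∈ l) :
    (l.filter (fun x => decide (x ≠ c))).length + 1 = l.length := by
  have he : l.erase c = l.filter (fun x => x != c) := hnd.erase_eq_filter c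
  have h2 : l.filter (fun x => decide (x ≠ c)) = l.erase c := by
    rw [he]; apply List.filter_congr; intro x _
    by_cases hxc : x = c <;> simp [hxc, bne]
  rw [h2, List.length_erase_of_mem hc]
  have : 0 < l.length := List.length_pos_of_mem hc
  omega

-- safe ports ----------------------------------------------------------------
def okP (components : List (List Int)) (q : Int) : Prop := [q] ∉ components

theorem pv_okP_zero {comps : List (List Int)} (hpre : Pre_get_longest_bridge comps) :
    okP comps 0 := by
  intro h
  have := hpre [0] h (by simp)
  simp at this

theorem pv_okP_step {comps : List (List Int)} {q : Int} {opt : List Int}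
    (hpre : Pre_get_longest_bridge comps) (hok : okP comps q)
    (hopt : opt ∈ comps) (hq : q ∈ opt) :
    ∃ p rest', PySem.List.remove? opt q = some (p :: rest') ∧ okP comps p := by
  have hrem := PySem.List.remove?_eq_some_erase opt q hq
  have hlen := List.length_erase_of_mem hq
  cases he : opt.erase q with
  | nil =>
    exfalso
    have hpos : 0 < opt.length := List.length_pos_of_mem hq
    have h1 : opt.length = 1 := by rw [he] at hlen; simp at hlen; omega
    have hopt1 : opt = [q] := by
      cases opt with
      | nil => simp at hq
      | cons a t =>
        cases t with
        | nil => simp at hq; simp [hq]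
        | cons b t' => simp at h1
    exact hok (hopt1 ▸ hopt)
  | cons p rest' =>
    refine ⟨p, rest', by rw [hrem, he], ?_⟩
    intro hpmem
    have hp_opt : p ∈ opt := by
      have : p ∈ opt.erase q := by rw [he]; simp
      exact List.mem_of_mem_erase this
    rcases hpre [p] hpmem (by simp) with ⟨-, hall⟩
    rcases hall opt hopt with h | h
    · have hq' : q = p := by rw [h] at hq; simpa using hq
      exact hok (by rw [hq']; exact hpmem)
    · simp at h
      exact h hp_opt

-- B's loop as a fold over the matching options ------------------------------
def candN (next : List (List Int) → Int → Int × Int) (pool : List (List Int))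
    (port : Int) (c : List Int) : Int × Int :=
  match (PySem.List.remove? c port).getD [] with
  | [] => ((1 : Int), pvSumC c)
  | p :: _ =>
    ((next (pool.filter (fun x => decide (x ≠ c))) p).1 + 1,
     (next (pool.filter (fun x => decide (x ≠ c))) p).2 + pvSumC c)

theorem pv_bGoF_eq (next : List (List Int) → Int → Int × Int) (pool : List (List Int))
    (port : Int) :
    ∀ (rem : List (List Int)) (best : Int × Int),
      bGoF next pool rem port best
        = List.foldl (fun b c => pvTMax b (candN next pool port c)) best
            (rem.filter (fun c => decide (port ∈ c)))
  | [], best => rfl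
  | c :: rem, best => by
    by_cases hc : port ∈ c
    · simp only [bGoF, List.filter_cons, hc, decide_true, if_true, List.foldl_cons]
      rw [pv_bGoF_eq next pool port rem _]
      unfold candN
      rfl
    · simp only [bGoF, List.filter_cons, hc, decide_false, if_false, Bool.false_eq_true]
      exact pv_bGoF_eq next pool port rem best

theorem pv_bDfs_succ (f : Nat) (pool : List (List Int)) (port : Int) :
    bDfs (f+1) pool port
      = List.foldl (fun b c => pvTMax b (candN (bDfs f) pool port c)) (0, 0)
          (pool.filter (fun c => decide (port ∈ c))) := by
  rw [show bDfs (f+1) pool port = bGoF (bDfs f) pool pool port (0, 0) from rfl]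
  exact pv_bGoF_eq _ _ _ _ _

-- the per-node subtree best -------------------------------------------------
def nodeBest (comps : List (List Int)) (e : List (List Int) × Int) : Int × Int :=
  let d := bDfs ((availL comps e.1).length + 1) (availL comps e.1) e.2
  ((e.1.length : Int) + d.1, pvStrength e.1 + d.2)

-- fuel accounting -----------------------------------------------------------
def entryCost (comps : List (List Int)) (e : List (List Int) × Int) : Nat :=
  Nat.factorial ((availL comps e.1).length + 1)
def stackCost (comps : List (List Int)) (st : List (List (List Int) × Int)) : Nat :=
  (st.map (entryCost comps)).sum

theorem pv_sum_map_const {α : Type} (f : α → Nat) (k : Nat) :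
    ∀ (l : List α), (∀ x ∈ l, f x = k) → (l.map f).sum = l.length * k
  | [], _ => by simp
  | x :: l, h => by
    simp only [List.map_cons, List.sum_cons, List.length_cons]
    rw [h x (by simp), pv_sum_map_const f k l (fun y hy => h y (by simp [hy]))]
    ring

-- the main simulation lemma: A's stack machine folds the lex-max of subtree bests
theorem pv_aLoop_eq (comps : List (List Int)) (hpre : Pre_get_longest_bridge comps) :
    ∀ (F : Nat) (st : List (List (List Int) × Int)) (L S : Int),
      (∀ e ∈ st, okP comps e.2) → stackCost comps st ≤ F →
      aLoop comps F st L S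
        = (st.foldl (fun acc e => pvTMax acc (nodeBest comps e)) (L, S)).2 := by
  intro F
  induction F with
  | zero =>
    intro st L S _ hcost
    cases st with
    | nil => rfl
    | cons e rest =>
      exfalso
      have : 0 < entryCost comps e := Nat.factorial_pos _
      simp [stackCost] at hcost
      omega
  | succ F ih =>
    intro st L S hok hcost
    cases st with
    | nil => rfl
    | cons e rest =>
      obtain ⟨chain, port⟩ := e
      have hokport : okP comps port := hok (chain, port) (by simp)
      -- unfold one iteration of the while loop
      rw [show aLoop comps (F+1) ((chain, port) :: rest) L S
            = aLoop comps F
                (((PySem.Set.diff (PySem.Set.ofList comps) (PySem.Set.ofList chain)).filter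
                    (fun cmp => decide (port ∈ cmp))).foldl
                    (fun st opt => (chain ++ [opt], pvNewPort port opt) :: st) rest)
                (if (chain.length : Int) ≥ L then (chain.length : Int) else L)
                (if (chain.length : Int) ≥ L then
                   (if (chain.length : Int) > L then pvStrength chain
                    else max S (pvStrength chain)) else S)
          from rfl]
      rw [pv_diff_eq_availL, pv_foldl_push,
          pv_upd_fst L S ((chain.length : Int)) (pvStrength chain),
          pv_upd_snd L S ((chain.length : Int)) (pvStrength chain)]
      set m := availL comps chain with hm
      have hmnd : m.Nodup := pv_nodup_availL comps chain
      set options := m.filter (fun cmp => decide (port ∈ cmp)) with hopts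
      have hopt_mem : ∀ opt ∈ options, opt ∈ m ∧ port ∈ opt := by
        intro opt h
        refine ⟨List.mem_of_mem_filter h, ?_⟩
        have := List.of_mem_filter h
        simpa using this
      -- each option yields a nonempty remainder with a safe new port
      have hchild : ∀ opt ∈ options,
          ∃ p rest', PySem.List.remove? opt port = some (p :: rest') ∧ okP comps p := by
        intro opt h
        obtain ⟨hmem, hin⟩ := hopt_mem opt h
        exact pv_okP_step hpre hokport (pv_availL_subset hmem) hin
      -- apply the induction hypothesis
      rw [ih _ _ _ ?hok' ?hcost']
      case hok' =>
        intro e' he'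
        rcases List.mem_append.1 he' with h | h
        · rcases List.mem_map.1 h with ⟨opt, hopt, rfl⟩
          rw [List.mem_reverse] at hopt
          obtain ⟨p, rest', hrem, hokp⟩ := hchild opt hopt
          show okP comps (pvNewPort port opt)
          unfold pvNewPort
          rw [hrem]
          exact hokp
        · exact hok _ (by simp [h])
      case hcost' =>
        have hlen_child : ∀ opt ∈ options,
            entryCost comps (chain ++ [opt], pvNewPort port opt) = Nat.factorial m.length := by
          intro opt hopt
          obtain ⟨hmem, -⟩ := hopt_mem opt hopt
          unfold entryCost
          rw [pv_availL_append, ← hm, pv_length_filter_ne hmnd hmem]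
        have hsum : ((options.reverse.map
              (fun opt => (chain ++ [opt], pvNewPort port opt))).map (entryCost comps)).sum
            = options.length * Nat.factorial m.length := by
          rw [List.map_map]
          rw [pv_sum_map_const _ _ _ (fun opt hopt => by
            have : opt ∈ options := List.mem_reverse.1 hopt
            exact hlen_child opt this)]
          simp
        have hcost1 : stackCost comps ((chain, port) :: rest)
            = Nat.factorial (m.length + 1) + (List.map (entryCost comps) rest).sum := by
          simp [stackCost, entryCost, ← hm]
        have hfac : Nat.factorial (m.length + 1)
            = m.length * Nat.factorial m.length + Nat.factorial m.length := by
          rw [Nat.factorial_succ]; ring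
        have hkle : options.length ≤ m.length := by
          rw [hopts]; exact List.length_filter_le _ _
        have hfacpos : 0 < Nat.factorial m.length := Nat.factorial_pos _
        have hmul : options.length * Nat.factorial m.length
            ≤ m.length * Nat.factorial m.length := Nat.mul_le_mul_right _ hkle
        rw [hcost1] at hcost
        show stackCost comps _ ≤ F
        rw [stackCost, List.map_append, List.sum_append, hsum]
        omega
      -- both folds agree
      simp only [Prod.mk.eta, List.foldl_append, List.foldl_cons, List.foldl_map]
      rw [pv_foldl_tmax_reverse]
      congr 1
      -- the inner fold over the options equals tmax (L,S) (subtree best of this node)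
      have hnode : nodeBest comps (chain, port)
          = pvShift ((chain.length : Int)) (pvStrength chain)
              (bDfs (m.length + 1) m port) := rfl
      rw [hnode, pv_bDfs_succ, ← hopts,
          ← pv_foldl_shift ((chain.length : Int)) (pvStrength chain)
            (candN (bDfs m.length) m port) options ((0 : Int), (0 : Int))]
      have hz : pvShift ((chain.length : Int)) (pvStrength chain) ((0 : Int), (0 : Int))
          = (((chain.length : Int)), pvStrength chain) := by simp [pvShift]
      rw [hz, pvTMax_foldl_distrib]
      congr 1
      apply pv_foldl_tmax_ext
      intro opt hopt
      obtain ⟨hmem, hin⟩ := hopt_mem opt hopt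
      obtain ⟨p, rest', hrem, -⟩ := hchild opt hopt
      have hnp : pvNewPort port opt = p := by unfold pvNewPort; rw [hrem]; rfl
      have hav : availL comps (chain ++ [opt]) = m.filter (fun x => decide (x ≠ opt)) := by
        rw [pv_availL_append, ← hm]
      have hlen2 : (m.filter (fun x => decide (x ≠ opt))).length + 1 = m.length :=
        pv_length_filter_ne hmnd hmem
      have hc1 : candN (bDfs m.length) m port opt
          = ((bDfs m.length (m.filter (fun x => decide (x ≠ opt))) p).1 + 1,
             (bDfs m.length (m.filter (fun x => decide (x ≠ opt))) p).2 + pvSumC opt) := by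
        unfold candN
        rw [hrem]
        rfl
      have hn1 : nodeBest comps (chain ++ [opt], pvNewPort port opt)
          = (((chain ++ [opt]).length : Int)
                + (bDfs m.length (m.filter (fun x => decide (x ≠ opt))) p).1,
             pvStrength (chain ++ [opt])
                + (bDfs m.length (m.filter (fun x => decide (x ≠ opt))) p).2) := by
        simp only [nodeBest]
        rw [hav, hlen2, hnp]
      rw [hn1, hc1]
      simp only [pvShift, Prod.mk.injEq, pvStrength_append, List.length_append,
        List.length_cons, List.length_nil]
      constructor <;> push_cast <;> ring

-- ===== VERDICT (by name: the statement is the Claim_ definition above) =====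
theorem get_longest_bridge_spec : Claim_equal_get_longest_bridge := by
  intro comps _hdom hpre
  unfold Spec_get_longest_bridge get_longest_bridge get_longest_bridge_alt
  rw [pv_aLoop_eq comps hpre (Nat.factorial (comps.length + 1)) [([], 0)] 0 0 ?hok ?hcost]
  case hok =>
    intro e he
    rw [List.mem_singleton] at he
    subst he
    exact pv_okP_zero hpre
  case hcost =>
    have h1 : (PySem.List.dedup comps).length ≤ comps.length := by
      rw [PySem.List.dedup_eq_ofList]
      exact PySem.Set.length_ofList_le comps
    simp only [stackCost, entryCost, pv_availL_nil, List.map_cons, List.map_nil,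
      List.sum_cons, List.sum_nil, Nat.add_zero]
    exact Nat.monotone_factorial (by omega)
  have h1 : nodeBest comps ([], 0)
      = bDfs ((PySem.List.dedup comps).length + 1) (PySem.List.dedup comps) 0 := by
    simp only [nodeBest, pv_availL_nil]
    simp [pvStrength]
  simp only [List.foldl_cons, List.foldl_nil, h1]
  have h2 : pvTMax ((0 : Int), (0 : Int))
        (bDfs ((PySem.List.dedup comps).length + 1) (PySem.List.dedup comps) 0)
      = bDfs ((PySem.List.dedup comps).length + 1) (PySem.List.dedup comps) 0 := by
    rw [pv_bDfs_succ]
    exact pvTMax_foldl_self _ _ _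
  rw [h2]
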